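-- pv_equiv track=rewrite | github.com/zrzr518/AI_first_assignment | Heuristic_Reversal digital.py | cal_w
-- ===== SOURCE A (Python) =====
-- def cal_w(state):
--     m_dist = 0
--     alist = []
--     alist.append(state[1][1])
--     alist.append(state[0][0])
--     alist.append(state[0][1])
--     alist.append(state[0][2])
--     alist.append(state[1][2])
--     alist.append(state[2][2])
--     alist.append(state[2][1])
--     alist.append(state[2][0])
--     alist.append(state[1][0])
--     for i in range(9):
--         for j in range(i,9):
--             if alist[i]==0 or alist[j]==0:
--                 continue
--             else:
--                 if alist[i]>alist[j]:
--                     m_dist+=1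
--     return m_dist
-- ===== SOURCE B (Python) =====
-- def cal_w(state):
--     ring = [state[1][1], state[0][0], state[0][1], state[0][2],
--             state[1][2], state[2][2], state[2][1], state[2][0], state[1][0]]
--     tiles = [x for x in ring if x != 0]
--
--     def sort_count(a):
--         # merge sort returning (sorted list, number of inversions in a)
--         if len(a) <= 1:
--             return a, 0
--         mid = len(a) // 2
--         left, cl = sort_count(a[:mid])
--         right, cr = sort_count(a[mid:])
--         merged = []
--         inv = cl + cr
--         i = j = 0
--         while i < len(left) and j < len(right):
--             if left[i] <= right[j]:
--                 merged.append(left[i]); i += 1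
--             else:
--                 inv += len(left) - i
--                 merged.append(right[j]); j += 1
--         merged.extend(left[i:])
--         merged.extend(right[j:])
--         return merged, inv
--
--     return sort_count(tiles)[1]
-- ===== Notes on version B (the rewrite author's own statement) =====
-- stated objective: alternative
-- what changed: Replaces the nested pairwise double loop by filtering out zeros once and then counting inversions with a divide-and-conquer merge sort that adds the remaining left-half length whenever an element is taken from the right half.
import Mathlib
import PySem

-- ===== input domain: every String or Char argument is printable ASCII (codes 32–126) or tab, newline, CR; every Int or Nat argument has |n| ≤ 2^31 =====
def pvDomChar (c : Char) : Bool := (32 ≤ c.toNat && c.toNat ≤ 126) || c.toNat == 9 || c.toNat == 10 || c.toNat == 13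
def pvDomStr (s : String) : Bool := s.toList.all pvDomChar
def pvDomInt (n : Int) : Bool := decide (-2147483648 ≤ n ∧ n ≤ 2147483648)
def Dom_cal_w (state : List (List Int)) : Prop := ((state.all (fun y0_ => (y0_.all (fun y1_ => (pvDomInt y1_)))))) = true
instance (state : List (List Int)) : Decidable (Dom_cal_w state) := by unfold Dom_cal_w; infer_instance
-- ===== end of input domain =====

-- B filters out zeros once and counts inversions of the ring list by divide-and-conquer
-- merge sort, instead of A's index-based nested pairwise double loop.

-- ===== PORT A =====
-- state[r][c] indexing: always in range under Pre_cal_w, so the getD defaults never fire.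
def cal_w (state : List (List Int)) : Int :=
  let alist : List Int :=
    [PySem.List.pyGetD (PySem.List.pyGetD state 1 []) 1 0,
     PySem.List.pyGetD (PySem.List.pyGetD state 0 []) 0 0,
     PySem.List.pyGetD (PySem.List.pyGetD state 0 []) 1 0,
     PySem.List.pyGetD (PySem.List.pyGetD state 0 []) 2 0,
     PySem.List.pyGetD (PySem.List.pyGetD state 1 []) 2 0,
     PySem.List.pyGetD (PySem.List.pyGetD state 2 []) 2 0,
     PySem.List.pyGetD (PySem.List.pyGetD state 2 []) 1 0,
     PySem.List.pyGetD (PySem.List.pyGetD state 2 []) 0 0,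
     PySem.List.pyGetD (PySem.List.pyGetD state 1 []) 0 0]
  (PySem.List.pyRange 0 9 1).foldl (fun m_dist i =>
    (PySem.List.pyRange i 9 1).foldl (fun m_dist j =>
      if PySem.List.pyGetD alist i 0 = 0 ∨ PySem.List.pyGetD alist j 0 = 0 then m_dist
      else if PySem.List.pyGetD alist i 0 > PySem.List.pyGetD alist j 0 then m_dist + 1
      else m_dist) m_dist) 0

-- ===== PORT B =====
-- merge loop of Source B: structural recursion over the two sorted halves, adding
-- len(left) - i (= length of remaining left part) when taking from the right.
def mergeCount : List Int → List Int → List Int × Int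
  | [], b => (b, 0)
  | x :: a, [] => (x :: a, 0)
  | x :: a, y :: b =>
    if x ≤ y then
      let p := mergeCount a (y :: b)
      (x :: p.1, p.2)
    else
      let p := mergeCount (x :: a) b
      (y :: p.1, p.2 + ((x :: a).length : Int))

-- sort_count of Source B: split at the middle, recurse, merge with count.
def sortCount (a : List Int) : List Int × Int :=
  if _h : a.length ≤ 1 then (a, 0)
  else
    let l := sortCount (a.take (a.length / 2))
    let r := sortCount (a.drop (a.length / 2))
    let m := mergeCount l.1 r.1
    (m.1, l.2 + r.2 + m.2)
termination_by a.length
decreasing_by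
  · simp only [List.length_take]; omega
  · simp only [List.length_drop]; omega

def cal_w_alt (state : List (List Int)) : Int :=
  let ring : List Int :=
    [PySem.List.pyGetD (PySem.List.pyGetD state 1 []) 1 0,
     PySem.List.pyGetD (PySem.List.pyGetD state 0 []) 0 0,
     PySem.List.pyGetD (PySem.List.pyGetD state 0 []) 1 0,
     PySem.List.pyGetD (PySem.List.pyGetD state 0 []) 2 0,
     PySem.List.pyGetD (PySem.List.pyGetD state 1 []) 2 0,
     PySem.List.pyGetD (PySem.List.pyGetD state 2 []) 2 0,
     PySem.List.pyGetD (PySem.List.pyGetD state 2 []) 1 0,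
     PySem.List.pyGetD (PySem.List.pyGetD state 2 []) 0 0,
     PySem.List.pyGetD (PySem.List.pyGetD state 1 []) 0 0]
  let tiles := ring.filter (fun x => decide (x ≠ 0))
  (sortCount tiles).2

-- ===== PRECONDITION & SPEC =====
-- Pre_ excludes exactly the inputs on which the Python A raises IndexError:
-- fewer than 3 rows, or one of the first 3 rows with fewer than 3 entries.
def Pre_cal_w (state : List (List Int)) : Prop :=
  3 ≤ state.length ∧ ∀ r ∈ state.take 3, 3 ≤ r.length
instance (state : List (List Int)) : Decidable (Pre_cal_w state) := by unfold Pre_cal_w; infer_instance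

def pvWitness_cal_w : List (List Int) := [[1, 2, 3], [4, 5, 6], [7, 8, 0]]

def Spec_cal_w (state : List (List Int)) (out : Int) : Prop := out = cal_w_alt state
instance (state : List (List Int)) (out : Int) : Decidable (Spec_cal_w state out) := by unfold Spec_cal_w; infer_instance

-- ===== CLAIM (what is proved, stated in full; the proofs are below) =====
def Claim_equal_cal_w : Prop := ∀ (state : List (List Int)), Dom_cal_w state → Pre_cal_w state → Spec_cal_w state (cal_w state)

-- ===== LEMMAS AND PROOFS =====

-- pair predicate: y is a nonzero tile smaller than x
def pvPred (x y : Int) : Bool := decide (y ≠ 0) && decide (y < x)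

-- zero-skipping inversion count (characterisation of A's double loop)
def pvInv : List Int → Int
  | [] => 0
  | x :: xs => (if x = 0 then 0 else ((xs.countP (pvPred x) : ℕ) : Int)) + pvInv xs

-- plain inversion count (head paired with all later strictly smaller elements)
def pvInvP : List Int → Int
  | [] => 0
  | x :: xs => ((xs.countP (fun y => decide (y < x)) : ℕ) : Int) + pvInvP xs

-- cross pairs: for each x in the left list, elements of r strictly smaller than x
def pvCross : List Int → List Int → Int
  | [], _ => 0
  | x :: a, r => ((r.countP (fun y => decide (y < x)) : ℕ) : Int) + pvCross a r

lemma pvInner (l : List Int) (x : Int) :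
    ∀ (k : ℕ) (i : ℕ) (m : Int), l.length - i = k → i ≤ l.length →
    (PySem.List.pyRange (i : Int) (l.length : Int) 1).foldl
      (fun m_dist j => if x = 0 ∨ PySem.List.pyGetD l j 0 = 0 then m_dist
        else if x > PySem.List.pyGetD l j 0 then m_dist + 1 else m_dist) m
    = m + (if x = 0 then 0 else (((l.drop i).countP (pvPred x) : ℕ) : Int)) := by
  intro k
  induction k with
  | zero =>
    intro i m hk hi
    have hie : i = l.length := by omega
    rw [PySem.List.pyRange_one_eq_nil (by exact_mod_cast Nat.le_of_eq hie.symm)]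
    simp [hie]
  | succ k ih =>
    intro i m hk hi
    have hilt : i < l.length := by omega
    rw [PySem.List.pyRange_one_cons (by exact_mod_cast hilt)]
    simp only [List.foldl_cons]
    have hget : PySem.List.pyGetD l (i : Int) 0 = l[i] := by
      rw [PySem.List.pyGetD_natCast]; exact List.getD_eq_getElem l 0 hilt
    have hstep : ((i : Int) + 1) = ((i + 1 : ℕ) : Int) := by push_cast; ring
    rw [hstep]
    rw [ih (i + 1) _ (by omega) (by omega)]
    have hdrop : l.drop i = l[i] :: l.drop (i + 1) := (List.getElem_cons_drop hilt).symm
    rw [hdrop, List.countP_cons, hget]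
    by_cases hx : x = 0
    · simp [hx]
    · by_cases hz : l[i] = 0
      · simp [hx, hz, pvPred]
      · by_cases hlt : l[i] < x
        · simp only [hx, hz, or_false, if_false, gt_iff_lt, hlt, if_true, pvPred,
            ne_eq, not_false_eq_true, decide_true, Bool.true_and]
          push_cast
          omega
        · simp only [hx, hz, or_false, if_false, gt_iff_lt, hlt, if_false, pvPred,
            ne_eq, not_false_eq_true, decide_true, Bool.true_and, decide_eq_true_eq]
          push_cast
          omega

lemma pvOuter (l : List Int) :
    ∀ (k : ℕ) (i : ℕ) (m : Int), l.length - i = k → i ≤ l.length →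
    (PySem.List.pyRange (i : Int) (l.length : Int) 1).foldl
      (fun m_dist i' =>
        (PySem.List.pyRange i' (l.length : Int) 1).foldl
          (fun m_dist j => if PySem.List.pyGetD l i' 0 = 0 ∨ PySem.List.pyGetD l j 0 = 0 then m_dist
            else if PySem.List.pyGetD l i' 0 > PySem.List.pyGetD l j 0 then m_dist + 1
            else m_dist) m_dist) m
    = m + pvInv (l.drop i) := by
  intro k
  induction k with
  | zero =>
    intro i m hk hi
    have hie : i = l.length := by omega
    rw [PySem.List.pyRange_one_eq_nil (by exact_mod_cast Nat.le_of_eq hie.symm)]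
    simp [hie, pvInv]
  | succ k ih =>
    intro i m hk hi
    have hilt : i < l.length := by omega
    rw [PySem.List.pyRange_one_cons (by exact_mod_cast hilt)]
    simp only [List.foldl_cons]
    rw [pvInner l (PySem.List.pyGetD l (i : Int) 0) (l.length - i) i m rfl (by omega)]
    have hstep : ((i : Int) + 1) = ((i + 1 : ℕ) : Int) := by push_cast; ring
    rw [hstep, ih (i + 1) _ (by omega) (by omega)]
    have hget : PySem.List.pyGetD l (i : Int) 0 = l[i] := by
      rw [PySem.List.pyGetD_natCast]; exact List.getD_eq_getElem l 0 hilt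
    have hdrop : l.drop i = l[i] :: l.drop (i + 1) := (List.getElem_cons_drop hilt).symm
    rw [hget, hdrop]
    simp only [pvInv, List.countP_cons, pvPred]
    by_cases hz : l[i] = 0
    · simp [hz]
    · simp only [hz, if_false]
      have hf : (decide (l[i] ≠ 0) && decide (l[i] < l[i])) = false := by simp
      simp only [hf]
      push_cast
      ring

-- skipping zeros in the pairwise count = plain count on the zero-filtered list
lemma pvInv_filter : ∀ l : List Int, pvInv l = pvInvP (l.filter (fun x => decide (x ≠ 0))) := by
  intro l
  induction l with
  | nil => rfl
  | cons x xs ih =>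
    by_cases hx : x = 0
    · simp [pvInv, hx, ih]
    · simp only [pvInv, hx, if_false, List.filter_cons, ne_eq,
        not_false_eq_true, decide_true, if_true, pvInvP, ih]
      congr 2
      rw [List.countP_filter]
      apply List.countP_congr
      intro y _
      simp [pvPred, Bool.and_comm]

lemma pvInvP_append : ∀ a b : List Int, pvInvP (a ++ b) = pvInvP a + pvCross a b + pvInvP b := by
  intro a b
  induction a with
  | nil => simp [pvInvP, pvCross]
  | cons x a ih =>
    simp only [List.cons_append, pvInvP, pvCross, List.countP_append, ih]
    push_cast
    ring

lemma pvCross_nil_right : ∀ a : List Int, pvCross a [] = 0 := by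
  intro a
  induction a with
  | nil => rfl
  | cons x a ih => simp [pvCross, ih]

lemma pvCross_cons_right (a : List Int) (y : Int) (b : List Int) :
    pvCross a (y :: b) = ((a.countP (fun u => decide (y < u)) : ℕ) : Int) + pvCross a b := by
  induction a with
  | nil => simp [pvCross]
  | cons x a ih =>
    simp only [pvCross, ih, List.countP_cons]
    by_cases h : y < x
    · simp [h]; ring
    · simp [h]; ring

lemma pvCross_perm_left {a a' : List Int} (h : a.Perm a') (r : List Int) :
    pvCross a r = pvCross a' r := by
  induction h with
  | nil => rfl
  | cons x _ ih => simp [pvCross, ih]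
  | swap x y l => simp [pvCross]; ring
  | trans _ _ ih1 ih2 => rw [ih1, ih2]

lemma pvCross_perm_right (a : List Int) {r r' : List Int} (h : r.Perm r') :
    pvCross a r = pvCross a r' := by
  induction a with
  | nil => rfl
  | cons x a ih => simp [pvCross, ih, h.countP_eq]

lemma mergeCount_perm : ∀ (a b : List Int), (mergeCount a b).1.Perm (a ++ b) := by
  intro a
  induction a with
  | nil => intro b; simp [mergeCount]
  | cons x a ih =>
    intro b
    induction b with
    | nil => simp [mergeCount]
    | cons y b ihb =>
      by_cases h : x ≤ y
      · simp only [mergeCount, h, if_true]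
        exact (ih (y :: b)).cons x
      · simp only [mergeCount, h, if_false]
        exact (ihb.cons y).trans List.perm_middle.symm

lemma mergeCount_sorted : ∀ (a b : List Int), a.Sorted (· ≤ ·) → b.Sorted (· ≤ ·) →
    (mergeCount a b).1.Sorted (· ≤ ·) := by
  intro a
  induction a with
  | nil => intro b _ hb; simpa [mergeCount] using hb
  | cons x a ih =>
    intro b ha hb
    induction b with
    | nil => simpa [mergeCount] using ha
    | cons y b ihb =>
      rw [List.sorted_cons] at ha hb
      by_cases h : x ≤ y
      · simp only [mergeCount, h, if_true]
        rw [List.sorted_cons]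
        refine ⟨?_, ih (y :: b) ha.2 (List.sorted_cons.mpr hb)⟩
        intro z hz
        have hz' := (mergeCount_perm a (y :: b)).mem_iff.mp hz
        rcases List.mem_append.mp hz' with h1 | h1
        · exact ha.1 z h1
        · rcases List.mem_cons.mp h1 with rfl | h2
          · exact h
          · exact le_trans h (hb.1 z h2)
      · simp only [mergeCount, h, if_false]
        rw [List.sorted_cons]
        refine ⟨?_, ihb hb.2⟩
        intro z hz
        have hz' := (mergeCount_perm (x :: a) b).mem_iff.mp hz
        have hyx : y ≤ x := le_of_not_ge h
        rcases List.mem_append.mp hz' with h1 | h1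
        · rcases List.mem_cons.mp h1 with rfl | h2
          · exact hyx
          · exact le_trans hyx (ha.1 z h2)
        · exact hb.1 z h1

lemma mergeCount_count : ∀ (a b : List Int), a.Sorted (· ≤ ·) → b.Sorted (· ≤ ·) →
    (mergeCount a b).2 = pvCross a b := by
  intro a
  induction a with
  | nil => intro b _ _; simp [mergeCount, pvCross]
  | cons x a ih =>
    intro b ha hb
    induction b with
    | nil => simp [mergeCount, pvCross, pvCross_nil_right]
    | cons y b ihb =>
      rw [List.sorted_cons] at ha hb
      by_cases h : x ≤ y
      · simp only [mergeCount, h, if_true]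
        rw [ih (y :: b) ha.2 (List.sorted_cons.mpr hb)]
        have hz : (y :: b).countP (fun z => decide (z < x)) = 0 := by
          rw [List.countP_eq_zero]
          intro z hz
          rcases List.mem_cons.mp hz with rfl | h2
          · simp; omega
          · have := hb.1 z h2; simp; omega
        simp [pvCross, hz]
      · simp only [mergeCount, h, if_false]
        rw [ihb hb.2]
        have hyx : y < x := by omega
        have hall : (x :: a).countP (fun u => decide (y < u)) = (x :: a).length := by
          rw [List.countP_eq_length]
          intro z hz
          rcases List.mem_cons.mp hz with rfl | h2
          · simp; omega
          · have := ha.1 z h2; simp; omega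
        rw [show pvCross (x :: a) (y :: b)
              = ((((x :: a).countP (fun u => decide (y < u)) : ℕ)) : Int) + pvCross (x :: a) b
            from pvCross_cons_right _ _ _, hall]
        push_cast
        ring

lemma pvInvP_short (a : List Int) (h : a.length ≤ 1) : pvInvP a = 0 := by
  match a, h with
  | [], _ => rfl
  | [x], _ => simp [pvInvP]

lemma sortCount_spec : ∀ (n : ℕ) (a : List Int), a.length ≤ n →
    (sortCount a).1.Perm a ∧ (sortCount a).1.Sorted (· ≤ ·) ∧ (sortCount a).2 = pvInvP a := by
  intro n
  induction n with
  | zero =>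
    intro a ha
    have : a = [] := List.length_eq_zero_iff.mp (Nat.le_zero.mp ha)
    subst this
    rw [sortCount]
    exact ⟨List.Perm.refl [], List.Pairwise.nil, rfl⟩
  | succ n ih =>
    intro a ha
    rw [sortCount]
    by_cases h1 : a.length ≤ 1
    · simp only [h1, dif_pos]
      refine ⟨List.Perm.refl a, ?_, (pvInvP_short a h1).symm⟩
      match a, h1 with
      | [], _ => exact List.Pairwise.nil
      | [x], _ => exact List.pairwise_singleton _ _
    · simp only [h1, dif_neg, not_false_eq_true]
      have hlt : a.length / 2 < a.length := by omega
      have hl := ih (a.take (a.length / 2)) (by simp only [List.length_take]; omega)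
      have hr := ih (a.drop (a.length / 2)) (by simp only [List.length_drop]; omega)
      obtain ⟨hlp, hls, hlc⟩ := hl
      obtain ⟨hrp, hrs, hrc⟩ := hr
      have hmp := mergeCount_perm (sortCount (a.take (a.length / 2))).1
        (sortCount (a.drop (a.length / 2))).1
      have happ : (a.take (a.length / 2)) ++ (a.drop (a.length / 2)) = a :=
        List.take_append_drop _ a
      refine ⟨?_, ?_, ?_⟩
      · have hpp := hlp.append hrp
        rw [happ] at hpp
        exact hmp.trans hpp
      · exact mergeCount_sorted _ _ hls hrs
      · rw [hlc, hrc, mergeCount_count _ _ hls hrs]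
        rw [pvCross_perm_left hlp, pvCross_perm_right _ hrp]
        conv_rhs => rw [← happ]
        rw [pvInvP_append]
        ring

-- ===== VERDICT (by name: the statement is the Claim_ definition above) =====
theorem cal_w_spec : Claim_equal_cal_w := by
  intro state _ _
  unfold Spec_cal_w cal_w cal_w_alt
  set ring : List Int :=
    [PySem.List.pyGetD (PySem.List.pyGetD state 1 []) 1 0,
     PySem.List.pyGetD (PySem.List.pyGetD state 0 []) 0 0,
     PySem.List.pyGetD (PySem.List.pyGetD state 0 []) 1 0,
     PySem.List.pyGetD (PySem.List.pyGetD state 0 []) 2 0,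
     PySem.List.pyGetD (PySem.List.pyGetD state 1 []) 2 0,
     PySem.List.pyGetD (PySem.List.pyGetD state 2 []) 2 0,
     PySem.List.pyGetD (PySem.List.pyGetD state 2 []) 1 0,
     PySem.List.pyGetD (PySem.List.pyGetD state 2 []) 0 0,
     PySem.List.pyGetD (PySem.List.pyGetD state 1 []) 0 0] with hring
  have hlen : ring.length = 9 := by simp [hring]
  have h9 : ((ring.length : ℕ) : Int) = 9 := by exact_mod_cast hlen
  simp only []
  rw [show (9 : Int) = ((ring.length : ℕ) : Int) from h9.symm]
  have ho := pvOuter ring ring.length 0 0 (by omega) (by omega)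
  simp only [Nat.cast_zero, List.drop_zero, zero_add] at ho
  rw [ho, pvInv_filter]
  exact ((sortCount_spec (ring.filter (fun x => decide (x ≠ 0))).length _ le_rfl).2.2).symm
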